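-- pv_equiv track=rewrite | github.com/vinayreddy-analytics/genhr | ai-service/interview.py | get_skill_synonyms
-- ===== SOURCE A (Python) =====
-- from typing import Dict, List, Tuple
--
-- def get_skill_synonyms(skill_name: str) -> List[str]:
--     """Get all synonyms for a skill"""
--     skill_lower = skill_name.lower().strip()
--
--     SKILL_SYNONYMS_DB = {
--         'autocad': ['cad', 'computer aided design', '2d design', '3d modeling'],
--         'solidworks': ['solid works', '3d modeling', 'parametric design'],
--         'python': ['python programming', 'py', 'python3'],
--         'javascript': ['js', 'ecmascript', 'web programming'],
--         'sql': ['structured query language', 'database querying'],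
--         'tableau': ['data visualization', 'business intelligence'],
--         'salesforce': ['sfdc', 'crm', 'customer relationship management'],
--         'react': ['reactjs', 'frontend framework'],
--     }
--
--     if skill_lower in SKILL_SYNONYMS_DB:
--         return SKILL_SYNONYMS_DB[skill_lower]
--
--     for main_skill, synonyms in SKILL_SYNONYMS_DB.items():
--         if skill_lower in synonyms:
--             return [main_skill] + [s for s in synonyms if s != skill_lower]
--
--     return []
-- ===== SOURCE B (Python) =====
-- from typing import Dict, List
--
-- _SKILL_SYNONYMS_DB = {
--     'autocad': ['cad', 'computer aided design', '2d design', '3d modeling'],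
--     'solidworks': ['solid works', '3d modeling', 'parametric design'],
--     'python': ['python programming', 'py', 'python3'],
--     'javascript': ['js', 'ecmascript', 'web programming'],
--     'sql': ['structured query language', 'database querying'],
--     'tableau': ['data visualization', 'business intelligence'],
--     'salesforce': ['sfdc', 'crm', 'customer relationship management'],
--     'react': ['reactjs', 'frontend framework'],
-- }
--
-- # One combined lookup table built once: main skills first (they win over any
-- # synonym with the same spelling), then each synonym on first occurrence.
-- _COMBINED: Dict[str, List[str]] = {}
-- for _main, _syns in _SKILL_SYNONYMS_DB.items():
--     _COMBINED[_main] = _syns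
-- for _main, _syns in _SKILL_SYNONYMS_DB.items():
--     for _s in _syns:
--         if _s not in _COMBINED:
--             _COMBINED[_s] = [_main] + [o for o in _syns if o != _s]
--
--
-- def get_skill_synonyms(skill_name: str) -> List[str]:
--     """Get all synonyms for a skill"""
--     return _COMBINED.get(skill_name.lower().strip(), [])
-- ===== Notes on version B (the rewrite author's own statement) =====
-- stated objective: idiomatic
-- what changed: A does a direct dict lookup and then, on a miss, scans every (main, synonyms) entry and filters the hit list; B precomputes one combined lookup table (main skills first, then each synonym on first occurrence mapped to [main]+others) so the body is a single dict lookup on the normalised name.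
import Mathlib
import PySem

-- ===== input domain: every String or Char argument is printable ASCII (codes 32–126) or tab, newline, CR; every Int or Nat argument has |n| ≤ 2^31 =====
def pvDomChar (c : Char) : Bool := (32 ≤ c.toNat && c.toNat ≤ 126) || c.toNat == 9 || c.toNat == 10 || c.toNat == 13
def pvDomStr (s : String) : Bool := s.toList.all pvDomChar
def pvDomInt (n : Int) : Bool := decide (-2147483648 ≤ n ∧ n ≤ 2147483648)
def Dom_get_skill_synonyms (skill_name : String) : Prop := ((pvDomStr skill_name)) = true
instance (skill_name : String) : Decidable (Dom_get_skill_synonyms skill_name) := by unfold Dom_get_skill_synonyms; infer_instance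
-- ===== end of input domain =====

-- B replaces A's direct-lookup-then-linear-scan-over-synonym-lists with one combined
-- lookup table built once (mains first, then first-occurrence synonyms), so the body
-- is a single dict lookup (objective: idiomatic/alternative; no speed claim).


-- ===== PORT A =====
-- the SKILL_SYNONYMS_DB dict literal, as its (key, value) pairs in insertion order
def skillDB : List (String × List String) :=
  [("autocad", ["cad", "computer aided design", "2d design", "3d modeling"]),
   ("solidworks", ["solid works", "3d modeling", "parametric design"]),
   ("python", ["python programming", "py", "python3"]),
   ("javascript", ["js", "ecmascript", "web programming"]),
   ("sql", ["structured query language", "database querying"]),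
   ("tableau", ["data visualization", "business intelligence"]),
   ("salesforce", ["sfdc", "crm", "customer relationship management"]),
   ("react", ["reactjs", "frontend framework"])]

-- A's 'for main_skill, synonyms in SKILL_SYNONYMS_DB.items(): if skill_lower in synonyms: return …'
def scanA (k : String) : List (String × List String) → List String
  | [] => []
  | (m, syns) :: rest =>
    if syns.contains k then m :: syns.filter (fun s => s != k) else scanA k rest

def get_skill_synonyms (skill_name : String) : List String :=
  let k := PySem.Str.strip (PySem.Str.lower skill_name)
  let db := PySem.Dict.ofList skillDB
  match db.get? k with
  | some v => v
  | none => scanA k db.items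

-- ===== PORT B =====
-- Source B's _COMBINED: insert every main skill, then every synonym on first occurrence
def pvCombined : PySem.Dict String (List String) :=
  let d1 := skillDB.foldl (fun d p => d.insert p.1 p.2) PySem.Dict.empty
  skillDB.foldl
    (fun d p => p.2.foldl
      (fun d s => if d.contains s then d else d.insert s (p.1 :: p.2.filter (fun o => o != s))) d)
    d1

def get_skill_synonyms_alt (skill_name : String) : List String :=
  pvCombined.getD (PySem.Str.strip (PySem.Str.lower skill_name)) []

-- ===== PRECONDITION & SPEC =====
def Spec_get_skill_synonyms (skill_name : String) (out : List String) : Prop := out = get_skill_synonyms_alt skill_name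
instance (skill_name : String) (out : List String) : Decidable (Spec_get_skill_synonyms skill_name out) := by unfold Spec_get_skill_synonyms; infer_instance

-- ===== CLAIM (what is proved, stated in full; the proofs are below) =====
def Claim_equal_get_skill_synonyms : Prop := ∀ (skill_name : String), Dom_get_skill_synonyms skill_name → Spec_get_skill_synonyms skill_name (get_skill_synonyms skill_name)

-- ===== LEMMAS AND PROOFS =====
-- the combined table, evaluated to its 29 literal entries
lemma pvCombined_eq : pvCombined = PySem.Dict.mk
  [("autocad", ["cad", "computer aided design", "2d design", "3d modeling"]),
   ("solidworks", ["solid works", "3d modeling", "parametric design"]),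
   ("python", ["python programming", "py", "python3"]),
   ("javascript", ["js", "ecmascript", "web programming"]),
   ("sql", ["structured query language", "database querying"]),
   ("tableau", ["data visualization", "business intelligence"]),
   ("salesforce", ["sfdc", "crm", "customer relationship management"]),
   ("react", ["reactjs", "frontend framework"]),
   ("cad", ["autocad", "computer aided design", "2d design", "3d modeling"]),
   ("computer aided design", ["autocad", "cad", "2d design", "3d modeling"]),
   ("2d design", ["autocad", "cad", "computer aided design", "3d modeling"]),
   ("3d modeling", ["autocad", "cad", "computer aided design", "2d design"]),
   ("solid works", ["solidworks", "3d modeling", "parametric design"]),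
   ("parametric design", ["solidworks", "solid works", "3d modeling"]),
   ("python programming", ["python", "py", "python3"]),
   ("py", ["python", "python programming", "python3"]),
   ("python3", ["python", "python programming", "py"]),
   ("js", ["javascript", "ecmascript", "web programming"]),
   ("ecmascript", ["javascript", "js", "web programming"]),
   ("web programming", ["javascript", "js", "ecmascript"]),
   ("structured query language", ["sql", "database querying"]),
   ("database querying", ["sql", "structured query language"]),
   ("data visualization", ["tableau", "business intelligence"]),
   ("business intelligence", ["tableau", "data visualization"]),
   ("sfdc", ["salesforce", "crm", "customer relationship management"]),
   ("crm", ["salesforce", "sfdc", "customer relationship management"]),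
   ("customer relationship management", ["salesforce", "sfdc", "crm"]),
   ("reactjs", ["react", "frontend framework"]),
   ("frontend framework", ["react", "reactjs"])] := by decide

lemma ofList_db : PySem.Dict.ofList skillDB = PySem.Dict.mk skillDB := by decide

-- every string that occurs as a key of the combined table
def keysAll : List String :=
  ["autocad", "solidworks", "python", "javascript", "sql", "tableau", "salesforce", "react",
   "cad", "computer aided design", "2d design", "3d modeling", "solid works", "parametric design",
   "python programming", "py", "python3", "js", "ecmascript", "web programming",
   "structured query language", "database querying", "data visualization", "business intelligence",
   "sfdc", "crm", "customer relationship management", "reactjs", "frontend framework"]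

-- on the normalised key, A's lookup-then-scan equals B's single combined lookup
lemma core_eq (k : String) :
    (match (PySem.Dict.ofList skillDB).get? k with
     | some v => v
     | none => scanA k (PySem.Dict.ofList skillDB).items) = pvCombined.getD k [] := by
  by_cases hmem : k ∈ keysAll
  · simp only [keysAll, List.mem_cons, List.not_mem_nil, or_false] at hmem
    rcases hmem with rfl|rfl|rfl|rfl|rfl|rfl|rfl|rfl|rfl|rfl|rfl|rfl|rfl|rfl|rfl|rfl|rfl|rfl|rfl|rfl|rfl|rfl|rfl|rfl|rfl|rfl|rfl|rfl|rfl <;> decide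
  · simp only [keysAll, List.mem_cons, List.not_mem_nil, or_false, not_or] at hmem
    obtain ⟨h1,h2,h3,h4,h5,h6,h7,h8,h9,h10,h11,h12,h13,h14,h15,h16,h17,h18,h19,h20,h21,h22,h23,h24,h25,h26,h27,h28,h29⟩ := hmem
    rw [ofList_db, pvCombined_eq]
    simp [skillDB, scanA, PySem.Dict.get?, PySem.Dict.getD_eq_get?_getD,
      h9,h10,h11,h12,h13,h14,h15,h16,h17,h18,h19,h20,h21,h22,h23,h24,h25,h26,h27,h28,h29,
      Ne.symm h1, Ne.symm h2, Ne.symm h3, Ne.symm h4, Ne.symm h5, Ne.symm h6, Ne.symm h7, Ne.symm h8,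
      Ne.symm h9, Ne.symm h10, Ne.symm h11, Ne.symm h12, Ne.symm h13, Ne.symm h14, Ne.symm h15, Ne.symm h16,
      Ne.symm h17, Ne.symm h18, Ne.symm h19, Ne.symm h20, Ne.symm h21, Ne.symm h22, Ne.symm h23, Ne.symm h24,
      Ne.symm h25, Ne.symm h26, Ne.symm h27, Ne.symm h28, Ne.symm h29]

-- ===== VERDICT (by name: the statement is the Claim_ definition above) =====
set_option maxHeartbeats 1000000 in
theorem get_skill_synonyms_spec : Claim_equal_get_skill_synonyms := by
  intro s _
  show get_skill_synonyms s = get_skill_synonyms_alt s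
  simp only [get_skill_synonyms, get_skill_synonyms_alt]
  exact core_eq (PySem.Str.strip (PySem.Str.lower s))
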